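-- pv_equiv track=rewrite | github.com/aditya109/data-structures-and-algorithms | crackingthecodinginterview/stacks/nearest_greatest_smallest.py | nearest_greatest_to_right
-- ===== SOURCE A (Python) =====
-- def nearest_greatest_to_right(arr):
--     l = len(arr)
--     ngr_tuple = []
--     # ngr_tuple contains (current_number, ngr, index of ngr)
--
--     stack = []
--
--     for i, v in enumerate(reversed(arr)):
--         if len(stack) == 0:
--             stack.append((v, l-i-1))
--             ngr_tuple.insert(0, (v, -1, -1))
--         else:
--             ngr_tuple.insert(0, (v, stack[-1][0], stack[-1][1]))
--             current_max = stack.pop()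
--             if v > current_max[0]:
--                 stack.append((v, l-i-1))
--             else:
--                 stack.append(current_max)
--     return ngr_tuple
-- ===== SOURCE B (Python) =====
-- def nearest_greatest_to_right(arr):
--     # Divide and conquer: solve(lo, hi) returns (rows, best) for the segment arr[lo:hi],
--     # where rows are the answer tuples as if the segment were the whole array
--     # ((v, -1, -1) meaning "nothing to the right inside the segment") and best is the
--     # (max value, rightmost index of that max) of the segment.  Merging patches every
--     # left-half row with the right half's best (ties go right, hence >=).
--     def solve(lo, hi):
--         if hi - lo == 1:
--             v = arr[lo]
--             return [(v, -1, -1)], (v, lo)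
--         mid = (lo + hi) // 2
--         lrows, lbest = solve(lo, mid)
--         rrows, rbest = solve(mid, hi)
--         rm, rj = rbest
--         rows = [(v, rm, rj) if (j == -1 or rm >= m) else (v, m, j)
--                 for (v, m, j) in lrows] + rrows
--         best = rbest if rm >= lbest[0] else lbest
--         return rows, best
--     if not arr:
--         return []
--     return solve(0, len(arr))[0]
-- ===== Notes on version B (the rewrite author's own statement) =====
-- stated objective: faster
-- what changed: Replaces A's single reverse stack-sweep (rows emitted via insert(0,...)) with a divide-and-conquer algorithm: recursively solve each half, returning rows plus the half's (max, rightmost index), and merge by patching left-half rows with the right half's best.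
import Mathlib
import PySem

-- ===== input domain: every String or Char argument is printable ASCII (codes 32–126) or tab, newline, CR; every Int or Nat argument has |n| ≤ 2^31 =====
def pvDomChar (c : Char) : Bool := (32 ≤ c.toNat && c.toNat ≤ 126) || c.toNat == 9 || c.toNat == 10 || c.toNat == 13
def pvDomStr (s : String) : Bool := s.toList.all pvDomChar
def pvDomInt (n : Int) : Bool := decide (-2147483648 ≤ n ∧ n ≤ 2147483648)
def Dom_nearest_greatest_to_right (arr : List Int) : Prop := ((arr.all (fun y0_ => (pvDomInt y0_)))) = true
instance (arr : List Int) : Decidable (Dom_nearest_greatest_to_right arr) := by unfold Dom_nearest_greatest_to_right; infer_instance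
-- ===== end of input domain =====

-- B replaces A's single reverse stack-sweep (rows built by insert(0,...)) with a
-- divide-and-conquer algorithm: solve each half recursively, then patch the left
-- half's rows with the right half's (max, rightmost index) (objective: faster).

-- ===== PORT A =====
-- state: (ngr_tuple, stack); stack modelled with its top at the HEAD (it holds at most one element)
def nearest_greatest_to_right (arr : List Int) : List (Int × Int × Int) :=
  let l : Int := arr.length
  ((PySem.List.enumerate arr.reverse 0).foldl
    (fun (st : List (Int × Int × Int) × List (Int × Int)) (p : Int × Int) =>
      let i := p.1
      let v := p.2
      match st.2 with
      | [] => (((v, -1, -1) :: st.1), [(v, l - i - 1)])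
      | top :: rest =>
        let ngr' := (v, top.1, top.2) :: st.1
        if v > top.1 then (ngr', (v, l - i - 1) :: rest) else (ngr', top :: rest))
    ([], [])).1

-- ===== PORT B =====
-- solve(lo, hi) of Source B: rows of the segment arr[lo:hi] plus its (max, rightmost index).
-- (the guard is '≤ 1' instead of '== 1' only to make the recursion total; Source B never
-- calls solve with hi - lo < 1)
def solveB (arr : List Int) (lo hi : Int) : List (Int × Int × Int) × (Int × Int) :=
  if _h : hi - lo ≤ 1 then
    let v := (PySem.List.pyGet? arr lo).getD 0  -- arr[lo]; in range whenever Source B reaches it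
    ([(v, -1, -1)], (v, lo))
  else
    let mid := PySem.Int.floordiv (lo + hi) 2
    let L := solveB arr lo mid
    let R := solveB arr mid hi
    let rm := R.2.1
    let rj := R.2.2
    let rows := (L.1.map (fun t => if t.2.2 == -1 || rm ≥ t.2.1 then (t.1, rm, rj) else t)) ++ R.1
    let best := if rm ≥ L.2.1 then R.2 else L.2
    (rows, best)
termination_by (hi - lo).toNat
decreasing_by
  · have h2 := PySem.Int.floordiv_eq_ediv_of_pos (a := lo + hi) (b := 2) (by omega)
    simp only [h2]; omega
  · have h2 := PySem.Int.floordiv_eq_ediv_of_pos (a := lo + hi) (b := 2) (by omega)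
    simp only [h2]; omega

def nearest_greatest_to_right_alt (arr : List Int) : List (Int × Int × Int) :=
  if arr.isEmpty then [] else (solveB arr 0 arr.length).1

-- ===== PRECONDITION & SPEC =====
def Spec_nearest_greatest_to_right (arr : List Int) (out : List (Int × Int × Int)) : Prop := out = nearest_greatest_to_right_alt arr
instance (arr : List Int) (out : List (Int × Int × Int)) : Decidable (Spec_nearest_greatest_to_right arr out) := by unfold Spec_nearest_greatest_to_right; infer_instance

-- ===== CLAIM (what is proved, stated in full; the proofs are below) =====
def Claim_equal_nearest_greatest_to_right : Prop := ∀ (arr : List Int), Dom_nearest_greatest_to_right arr → Spec_nearest_greatest_to_right arr (nearest_greatest_to_right arr)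

-- ===== LEMMAS AND PROOFS =====

-- best (max value, rightmost index of that max) of xs when xs starts at absolute index i
def stepB (v i : Int) : Option (Int × Int) → Option (Int × Int)
  | none => some (v, i)
  | some (m, j) => if v > m then some (v, i) else some (m, j)

def bestOf : List Int → Int → Option (Int × Int)
  | [], _ => none
  | v :: r, i => stepB v i (bestOf r (i + 1))

-- the result rows for xs starting at absolute index i
def rowsOf : List Int → Int → List (Int × Int × Int)
  | [], _ => []
  | v :: r, i =>
    (match bestOf r (i + 1) with
     | none => (v, -1, -1)
     | some (m, j) => (v, m, j)) :: rowsOf r (i + 1)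

def combineB : Option (Int × Int) → Option (Int × Int) → Option (Int × Int)
  | a, none => a
  | none, some b => some b
  | some a, some b => if a.1 > b.1 then some a else some b

def optToList : Option (Int × Int) → List (Int × Int)
  | none => []
  | some b => [b]

-- the segment arr[lo:hi]
def seg (arr : List Int) (lo hi : Int) : List Int :=
  (arr.drop lo.toNat).take (hi - lo).toNat

theorem foldA_char (l : Int) (xs : List Int) :
    ((PySem.List.enumerate xs.reverse 0).foldl
      (fun (st : List (Int × Int × Int) × List (Int × Int)) (p : Int × Int) =>
        let i := p.1
        let v := p.2
        match st.2 with
        | [] => (((v, -1, -1) :: st.1), [(v, l - i - 1)])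
        | top :: rest =>
          let ngr' := (v, top.1, top.2) :: st.1
          if v > top.1 then (ngr', (v, l - i - 1) :: rest) else (ngr', top :: rest))
      ([], [])) = (rowsOf xs (l - xs.length), optToList (bestOf xs (l - xs.length))) := by
  induction xs with
  | nil => simp [rowsOf, bestOf, optToList, PySem.List.enumerate_nil]
  | cons v r ih =>
    rw [List.reverse_cons, PySem.List.enumerate_append, List.foldl_append, ih]
    have hlen : (PySem.List.enumerate [v] (0 + (r.reverse.length : Int))) = [((r.length : Int), v)] := by
      simp [PySem.List.enumerate_cons, PySem.List.enumerate_nil]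
    rw [hlen]
    have harith : l - (r.length : Int) - 1 = l - ((v :: r).length : Int) := by
      simp; omega
    have harith2 : l - ((v :: r).length : Int) + 1 = l - (r.length : Int) := by
      simp; omega
    simp only [List.foldl_cons, List.foldl_nil, rowsOf, bestOf, harith2]
    cases hb : bestOf r (l - (r.length : Int)) with
    | none => simp [optToList, stepB, harith]
    | some b =>
      simp only [optToList, stepB]
      by_cases hv : v > b.1
      · simp [hv, harith]
      · simp [hv]

theorem step_combine (v i : Int) (a b : Option (Int × Int)) :
    stepB v i (combineB a b) = combineB (stepB v i a) b := by
  rcases a with _ | ⟨m, j⟩ <;> rcases b with _ | ⟨m', j'⟩ <;>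
    simp only [stepB, combineB] <;> split_ifs <;>
    simp_all only [stepB, combineB] <;> split_ifs <;> simp_all <;> omega

theorem bestOf_append (xs ys : List Int) (i : Int) :
    bestOf (xs ++ ys) i = combineB (bestOf xs i) (bestOf ys (i + xs.length)) := by
  induction xs generalizing i with
  | nil =>
    cases h : bestOf ys i <;> simp [bestOf, combineB, h]
  | cons v r ih =>
    have harith : i + ((v :: r).length : Int) = (i + 1) + (r.length : Int) := by
      simp; omega
    simp only [List.cons_append, bestOf, ih, harith, step_combine]

theorem bestOf_idx_ge (xs : List Int) (i m j : Int) (h : bestOf xs i = some (m, j)) : i ≤ j := by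
  induction xs generalizing i m j with
  | nil => simp [bestOf] at h
  | cons v r ih =>
    simp only [bestOf] at h
    cases hb : bestOf r (i + 1) with
    | none => rw [hb] at h; simp [stepB] at h; omega
    | some b =>
      obtain ⟨m', j'⟩ := b
      rw [hb] at h
      have hih := ih (i + 1) m' j' hb
      simp only [stepB] at h
      split_ifs at h <;> simp_all <;> omega

theorem bestOf_isSome (xs : List Int) (i : Int) (h : xs ≠ []) : (bestOf xs i).isSome := by
  cases xs with
  | nil => simp at h
  | cons v r =>
    simp only [bestOf]
    cases bestOf r (i + 1) with
    | none => simp [stepB]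
    | some b => simp only [stepB]; split_ifs <;> simp

theorem rowsOf_append (xs ys : List Int) (i rm rj : Int) (hi0 : 0 ≤ i)
    (hys : bestOf ys (i + xs.length) = some (rm, rj)) :
    rowsOf (xs ++ ys) i =
      (rowsOf xs i).map (fun t => if t.2.2 == -1 || rm ≥ t.2.1 then (t.1, rm, rj) else t)
        ++ rowsOf ys (i + (xs.length : Int)) := by
  induction xs generalizing i with
  | nil => simp [rowsOf]
  | cons v r ih =>
    have harith : i + ((v :: r).length : Int) = (i + 1) + (r.length : Int) := by
      simp; omega
    rw [harith] at hys
    have hb := bestOf_append r ys (i + 1)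
    rw [hys] at hb
    simp only [List.cons_append, rowsOf, hb, List.map_cons, harith,
      ih (i + 1) (by omega) hys]
    cases hr : bestOf r (i + 1) with
    | none => simp [combineB]
    | some b =>
      obtain ⟨m, j⟩ := b
      have hj : i + 1 ≤ j := bestOf_idx_ge r (i + 1) m j hr
      simp only [combineB]
      have hjne : (j == (-1 : Int)) = false := by simp; omega
      by_cases hc : m > rm
      · have : (rm ≥ m) = False := by simp; omega
        simp [hc, hjne, this]
      · have : rm ≥ m := by omega
        simp [hc, hjne, this]

theorem seg_split (arr : List Int) (lo mid hi : Int) (h0 : 0 ≤ lo) (h1 : lo ≤ mid) (h2 : mid ≤ hi) :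
    seg arr lo hi = seg arr lo mid ++ seg arr mid hi := by
  unfold seg
  have hsum : (hi - lo).toNat = (mid - lo).toNat + (hi - mid).toNat := by omega
  rw [hsum, List.take_add]
  congr 1
  rw [List.drop_drop]
  congr 2
  omega

theorem seg_len (arr : List Int) (lo hi : Int) (h0 : 0 ≤ lo) (h2 : hi ≤ (arr.length : Int)) :
    (seg arr lo hi).length = (hi - lo).toNat := by
  unfold seg
  simp [List.length_take, List.length_drop]
  omega

theorem solveB_eq (arr : List Int) (n : Nat) (lo hi : Int)
    (h0 : 0 ≤ lo) (h1 : lo < hi) (h2 : hi ≤ (arr.length : Int))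
    (hn : (hi - lo).toNat = n) :
    solveB arr lo hi = (rowsOf (seg arr lo hi) lo, (bestOf (seg arr lo hi) lo).getD (0, 0)) := by
  induction n using Nat.strong_induction_on generalizing lo hi with
  | _ n ih =>
    rw [solveB]
    by_cases hb : hi - lo ≤ 1
    · have hone : hi = lo + 1 := by omega
      have hlt : lo.toNat < arr.length := by omega
      have hseg : seg arr lo hi = [arr[lo.toNat]] := by
        unfold seg
        have h1' : (hi - lo).toNat = 1 := by omega
        rw [h1', List.drop_eq_getElem_cons hlt, List.take_succ_cons, List.take_zero]
      have hv : (PySem.List.pyGet? arr lo).getD 0 = arr[lo.toNat] := by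
        rw [PySem.List.pyGet?_eq_some_getElem arr h0 (by omega)]
        rfl
      simp [hb, hseg, hv, rowsOf, bestOf, stepB]
    · simp only [hb, dif_neg, not_false_iff, if_neg]
      have hmid := PySem.Int.floordiv_eq_ediv_of_pos (a := lo + hi) (b := 2) (by omega)
      set mid := PySem.Int.floordiv (lo + hi) 2 with hmiddef
      have hm1 : lo < mid := by rw [hmid]; omega
      have hm2 : mid < hi := by rw [hmid]; omega
      have hL := ih (mid - lo).toNat (by omega) lo mid h0 hm1 (by omega) rfl
      have hR := ih (hi - mid).toNat (by omega) mid hi (by omega) hm2 h2 rfl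
      have hsegR_ne : seg arr mid hi ≠ [] := by
        have := seg_len arr mid hi (by omega) h2
        intro hcon; rw [hcon] at this; simp at this; omega
      have hsegL_ne : seg arr lo mid ≠ [] := by
        have := seg_len arr lo mid h0 (by omega)
        intro hcon; rw [hcon] at this; simp at this; omega
      have hsegLlen : ((seg arr lo mid).length : Int) = mid - lo := by
        rw [seg_len arr lo mid h0 (by omega)]; omega
      -- right best is some
      obtain ⟨⟨rm, rj⟩, hRbest⟩ := Option.isSome_iff_exists.mp (bestOf_isSome (seg arr mid hi) mid hsegR_ne)
      obtain ⟨⟨lm, lj⟩, hLbest⟩ := Option.isSome_iff_exists.mp (bestOf_isSome (seg arr lo mid) lo hsegL_ne)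
      have hsplit := seg_split arr lo mid hi h0 (by omega) (by omega)
      have hys : bestOf (seg arr mid hi) (lo + ((seg arr lo mid).length : Int)) = some (rm, rj) := by
        have : lo + ((seg arr lo mid).length : Int) = mid := by omega
        rw [this, hRbest]
      have hrows := rowsOf_append (seg arr lo mid) (seg arr mid hi) lo rm rj h0 hys
      have hbest := bestOf_append (seg arr lo mid) (seg arr mid hi) lo
      rw [hLbest, hys] at hbest
      rw [hL, hR, hRbest, hLbest]
      simp only [Option.getD_some]
      rw [hsplit, hrows, hbest]
      have : lo + ((seg arr lo mid).length : Int) = mid := by omega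
      rw [this]
      simp only [combineB]
      by_cases hc : lm > rm
      · have hge : (rm ≥ lm) = False := by simp; omega
        simp [hc, hge]
      · have hge : rm ≥ lm := by omega
        simp [hc, hge]

theorem rowsA (arr : List Int) :
    nearest_greatest_to_right arr = rowsOf arr 0 := by
  unfold nearest_greatest_to_right
  simp only
  rw [foldA_char (arr.length : Int) arr]
  simp

-- ===== VERDICT (by name: the statement is the Claim_ definition above) =====
theorem nearest_greatest_to_right_spec : Claim_equal_nearest_greatest_to_right := by
  intro arr _
  unfold Spec_nearest_greatest_to_right nearest_greatest_to_right_alt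
  rw [rowsA]
  cases harr : arr with
  | nil => simp [rowsOf]
  | cons v r =>
    rw [← harr]
    have hne : arr ≠ [] := by rw [harr]; simp
    have hemp : arr.isEmpty = false := by simp [harr]
    rw [hemp]
    simp only [Bool.false_eq_true, if_false]
    have hlen : (0 : Int) < (arr.length : Int) := by
      simp [harr]
    rw [solveB_eq arr (arr.length : Int).toNat 0 (arr.length : Int) (by omega) hlen (by omega) (by omega)]
    have hseg : seg arr 0 (arr.length : Int) = arr := by
      unfold seg; simp
    rw [hseg]
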